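-- pv_equiv track=rewrite | github.com/renode/zephyr-samples-builder | scripts/generate_summary.py | process_sample_data
-- ===== SOURCE A (Python) =====
-- def process_sample_data(aggregated_jsons: list) -> dict:
--     """
--     Process aggregated build result data into a dictionary organized by sample names.
--
--     Args:
--         aggregated_jsons (list): A list of dictionaries containing aggregated build result data.
--             Each dictionary should contain information about a build result.
--
--     Returns:
--         dict: A dictionary where keys are sample names and values are lists of build result items
--             sorted by 'platform' value within each list.
--     """
--     sample_dict = {}
--
--     # Generate and fill dict keys
--     for build_result in aggregated_jsons:
--         sample_name = build_result['sample_name']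
--         if sample_name not in sample_dict:
--             sample_dict[sample_name] = []
--         sample_dict[sample_name].append(build_result)
--
--     # Sort the items in each list by 'platform'
--     for sample_name, items in sample_dict.items():
--         sample_dict[sample_name] = sorted(items, key=lambda x: x['platform'])
--
--     return sample_dict
-- ===== SOURCE B (Python) =====
-- def process_sample_data(aggregated_jsons: list) -> dict:
--     # Distinct sample names in first-occurrence order, then build each group
--     # directly by filtering the input and sorting it by platform.
--     names = dict.fromkeys(br['sample_name'] for br in aggregated_jsons)
--     return {
--         n: sorted((br for br in aggregated_jsons if br['sample_name'] == n),
--                   key=lambda x: x['platform'])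
--         for n in names
--     }
-- ===== Notes on version B (the rewrite author's own statement) =====
-- stated objective: alternative
-- what changed: Replaces A's mutable bucket dictionary (grouping fold plus a second per-bucket sorting loop) with a declarative comprehension: compute the distinct sample names once, then build each group directly by filtering the input for that name and sorting the filtered list by platform.
import Mathlib
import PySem

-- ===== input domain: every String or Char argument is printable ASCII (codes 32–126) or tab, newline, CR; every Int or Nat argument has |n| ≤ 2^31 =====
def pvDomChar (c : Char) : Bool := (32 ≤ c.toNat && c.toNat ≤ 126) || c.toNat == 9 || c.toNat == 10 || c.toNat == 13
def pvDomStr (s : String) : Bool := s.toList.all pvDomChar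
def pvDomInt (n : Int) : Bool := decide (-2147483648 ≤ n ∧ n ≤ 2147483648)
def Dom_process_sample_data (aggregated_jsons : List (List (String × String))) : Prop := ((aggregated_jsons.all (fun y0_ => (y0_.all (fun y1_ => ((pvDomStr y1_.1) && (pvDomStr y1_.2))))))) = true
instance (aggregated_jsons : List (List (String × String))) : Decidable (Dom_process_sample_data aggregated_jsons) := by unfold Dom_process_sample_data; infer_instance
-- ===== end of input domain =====

-- B replaces A's mutable bucket dict (grouping fold + per-bucket re-sorting loop) with a declarative
-- comprehension: distinct names once, then filter-and-sort per name (alternative decomposition, same results).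


-- build_result['k'] : the build_result dicts are association lists; first match, "" only outside Pre_ (Python raises KeyError there)
def pvGet (r : List (String × String)) (k : String) : String :=
  (PySem.Dict.mk r).getD k ""

-- ===== PORT A =====
def process_sample_data (aggregated_jsons : List (List (String × String))) : List (String × List (List (String × String))) :=
  let sample_dict : PySem.Dict String (List (List (String × String))) :=
    aggregated_jsons.foldl (fun d build_result =>
      let sample_name := pvGet build_result "sample_name"
      let d := if d.contains sample_name then d else d.insert sample_name []
      d.modify sample_name [] (· ++ [build_result])) PySem.Dict.empty
  let sample_dict2 :=
    sample_dict.items.foldl (fun d p =>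
      d.insert p.1 (PySem.List.sorted p.2 (fun x => pvGet x "platform") false)) sample_dict
  sample_dict2.items

-- ===== PORT B =====
def process_sample_data_alt (aggregated_jsons : List (List (String × String))) : List (String × List (List (String × String))) :=
  let names := PySem.List.dedup (aggregated_jsons.map (fun br => pvGet br "sample_name"))
  names.map (fun n =>
    (n, PySem.List.sorted (aggregated_jsons.filter (fun br => pvGet br "sample_name" == n))
          (fun x => pvGet x "platform") false))

-- ===== PRECONDITION & SPEC =====
-- Pre_ excludes exactly the inputs where the Pythons raise KeyError: some build_result lacking
-- the 'sample_name' or 'platform' key.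
def Pre_process_sample_data (aggregated_jsons : List (List (String × String))) : Prop :=
  ∀ r ∈ aggregated_jsons, "sample_name" ∈ r.map Prod.fst ∧ "platform" ∈ r.map Prod.fst
instance (aggregated_jsons : List (List (String × String))) : Decidable (Pre_process_sample_data aggregated_jsons) := by unfold Pre_process_sample_data; infer_instance
def pvWitness_process_sample_data : (List (List (String × String))) :=
  [[("sample_name", "hello"), ("platform", "board_a")], [("sample_name", "hello"), ("platform", "board_b")]]

def Spec_process_sample_data (aggregated_jsons : List (List (String × String))) (out : List (String × List (List (String × String)))) : Prop := out = process_sample_data_alt aggregated_jsons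
instance (aggregated_jsons : List (List (String × String))) (out : List (String × List (List (String × String)))) : Decidable (Spec_process_sample_data aggregated_jsons out) := by unfold Spec_process_sample_data; infer_instance

-- ===== CLAIM (what is proved, stated in full; the proofs are below) =====
def Claim_equal_process_sample_data : Prop := ∀ (aggregated_jsons : List (List (String × String))), Dom_process_sample_data aggregated_jsons → Pre_process_sample_data aggregated_jsons → Spec_process_sample_data aggregated_jsons (process_sample_data aggregated_jsons)

-- ===== LEMMAS AND PROOFS =====

-- step equality: A's "if absent insert []" then append-modify = plain append-modify
theorem pv_step_eq {V : Type} (d : PySem.Dict String (List V)) (k : String) (r : V) :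
    ((if d.contains k then d else d.insert k []).modify k [] (· ++ [r])) = d.modify k [] (· ++ [r]) := by
  by_cases h : d.contains k
  · simp [h]
  · simp only [h, Bool.false_eq_true, if_false]
    simp [PySem.Dict.modify, PySem.Dict.getD_insert_self,
      PySem.Dict.getD_of_not_contains d [] (by simpa using h)]
    have hc : d.contains k = false := by simpa using h
    have hnk : ∀ p ∈ d.items, (p.1 == k) = false := by
      intro p hp
      by_contra hbk
      have : p.1 = k := by simpa using hbk
      subst this
      have := (PySem.Dict.contains_iff_mem_keys d p.1).mpr (PySem.Dict.mem_keys_of_mem_items d hp)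
      simp [this] at hc
    apply PySem.Dict.ext
    rw [PySem.Dict.items_insert_of_contains _ _ (PySem.Dict.contains_insert_self d k []),
        PySem.Dict.items_insert_of_not_contains _ _ hc,
        PySem.Dict.items_insert_of_not_contains _ _ hc,
        List.map_append]
    congr 1
    · exact List.map_congr_left (fun p hp => by simp [hnk p hp]) |>.trans (List.map_id _)
    · simp

-- Set.update by elements already present is the identity
theorem pv_update_of_subset (s : PySem.Set String) (l : List String) (h : ∀ x ∈ l, x ∈ s) :
    PySem.Set.update s l = s := by
  induction l generalizing s with
  | nil => rfl
  | cons x t ih =>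
      simp only [PySem.Set.update, List.foldl_cons]
      rw [PySem.Set.add_of_mem (h x (by simp))]
      exact ih s (fun y hy => h y (by simp [hy]))

-- an insert fold leaves absent keys untouched
theorem pv_getD_foldl_insert_not_mem {V W : Type} (g : String × V → W)
    (l : List (String × V)) (d : PySem.Dict String W) (n : String) (dflt : W)
    (hn : n ∉ l.map Prod.fst) :
    (l.foldl (fun d p => d.insert p.1 (g p)) d).getD n dflt = d.getD n dflt := by
  induction l generalizing d with
  | nil => rfl
  | cons p t ih =>
      simp only [List.map_cons, List.mem_cons, not_or] at hn
      simp only [List.foldl_cons]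
      rw [ih _ (by simpa using hn.2), PySem.Dict.getD_insert]
      simp [hn.1]

-- getD after folding inserts over pairs with nodup keys
theorem pv_getD_foldl_insert_mem {V W : Type} (g : String × V → W)
    (l : List (String × V)) (d : PySem.Dict String W) (n : String) (v : V) (dflt : W)
    (hnd : (l.map Prod.fst).Nodup) (hm : (n, v) ∈ l) :
    (l.foldl (fun d p => d.insert p.1 (g p)) d).getD n dflt = g (n, v) := by
  induction l generalizing d with
  | nil => cases hm
  | cons p t ih =>
      have hnd2 : p.1 ∉ t.map Prod.fst ∧ (t.map Prod.fst).Nodup :=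
        List.nodup_cons.mp (by simpa using hnd)
      simp only [List.foldl_cons]
      rcases List.mem_cons.mp hm with hm | hm
      · subst hm
        have hn : n ∉ t.map Prod.fst := hnd2.1
        rw [pv_getD_foldl_insert_not_mem]
        · exact PySem.Dict.getD_insert_self _ _ _ _
        · exact hn
      · exact ih _ hnd2.2 hm

-- items of a nodup-keys dict are its keys paired with their values
theorem pv_items_eq {V : Type} (d : PySem.Dict String V) (dflt : V) (h : d.keys.Nodup) :
    d.items = d.keys.map (fun k => (k, d.getD k dflt)) := by
  obtain ⟨l⟩ := d
  induction l with
  | nil => rfl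
  | cons p t ih =>
      obtain ⟨k0, v0⟩ := p
      simp only [PySem.Dict.keys, List.map_cons] at h ⊢
      obtain ⟨hp, hnd⟩ := List.nodup_cons.mp h
      have hhead : PySem.Dict.getD ⟨(k0, v0) :: t⟩ k0 dflt = v0 := by
        simp [PySem.Dict.getD, PySem.Dict.get?_mk_cons]
      have htail : ∀ q ∈ t,
          PySem.Dict.getD ⟨(k0, v0) :: t⟩ q.1 dflt = PySem.Dict.getD ⟨t⟩ q.1 dflt := by
        intro q hq
        have hne : (k0 == q.1) = false := by
          simp only [beq_eq_false_iff_ne, ne_eq]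
          exact fun e => hp (by exact e ▸ List.mem_map_of_mem hq)
        simp [PySem.Dict.getD, PySem.Dict.get?_mk_cons, hne]
      have hmapeq : List.map (fun k => (k, PySem.Dict.getD ⟨(k0, v0) :: t⟩ k dflt)) (List.map (fun x => x.1) t)
          = List.map (fun k => (k, PySem.Dict.getD ⟨t⟩ k dflt)) (List.map (fun x => x.1) t) := by
        apply List.map_congr_left
        intro k hk
        obtain ⟨q, hq, rfl⟩ := List.mem_map.mp hk
        rw [htail q hq]
      rw [hhead, hmapeq]
      congr 1
      simpa [PySem.Dict.keys] using ih hnd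

-- grouping fold characterised: the bucket of n is the filter of the input
theorem pv_getD_group (key : List (String × String) → String)
    (l : List (List (String × String)))
    (d : PySem.Dict String (List (List (String × String)))) (n : String) :
    (l.foldl (fun d r => d.modify (key r) [] (· ++ [r])) d).getD n []
      = d.getD n [] ++ l.filter (fun r => key r == n) := by
  have h : l.foldl (fun d r => d.modify (key r) [] (· ++ [r])) d
      = (l.map (fun r => (key r, r))).foldl (fun d p => d.modify p.1 [] (· ++ [p.2])) d := by
    rw [List.foldl_map]
  rw [h, PySem.Dict.getD_foldl_modify_append, List.filter_map, List.map_map]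
  congr 1
  exact (List.map_congr_left (fun a _ => rfl)).trans (List.map_id _)

-- A computes exactly B's comprehension: keys are the deduped names, each bucket the sorted filter
theorem pv_A_eq (xs : List (List (String × String))) :
    process_sample_data xs = process_sample_data_alt xs := by
  unfold process_sample_data
  have hstep : (fun (d : PySem.Dict String (List (List (String × String)))) build_result =>
      let sample_name := pvGet build_result "sample_name"
      let d := if d.contains sample_name then d else d.insert sample_name []
      d.modify sample_name [] (· ++ [build_result]))
    = fun d build_result => d.modify (pvGet build_result "sample_name") [] (· ++ [build_result]) := by
    funext d r
    exact pv_step_eq d (pvGet r "sample_name") r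
  rw [hstep]
  set d1 := xs.foldl
      (fun d build_result => d.modify (pvGet build_result "sample_name") [] (· ++ [build_result]))
      PySem.Dict.empty with hd1
  have f1 : d1.keys = PySem.Set.ofList (xs.map (fun r => pvGet r "sample_name")) := by
    rw [hd1]
    have := PySem.Dict.keys_foldl_modify_key xs (fun r => pvGet r "sample_name") []
      (fun _ r => (· ++ [r])) PySem.Dict.empty
    simpa [PySem.Set.ofList_eq_foldl, PySem.Set.update] using this
  have f2 : d1.keys.Nodup := by
    rw [hd1]
    exact PySem.Dict.nodup_keys_foldl_modify_key xs (fun r => pvGet r "sample_name") []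
      (fun _ r => (· ++ [r])) PySem.Dict.empty (by simp)
  have f3 : ∀ n, d1.getD n [] = xs.filter (fun r => pvGet r "sample_name" == n) := by
    intro n
    rw [hd1]
    simpa using pv_getD_group (fun r => pvGet r "sample_name") xs PySem.Dict.empty n
  set g : String × List (List (String × String)) → List (List (String × String)) :=
    fun p => PySem.List.sorted p.2 (fun x => pvGet x "platform") false with hg
  set d2 := d1.items.foldl (fun d p => d.insert p.1 (g p)) d1 with hd2
  have hkitems : d1.items.map Prod.fst = d1.keys := rfl
  have f4 : d2.keys = d1.keys := by
    rw [hd2]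
    have := PySem.Dict.keys_foldl_insert_key d1.items Prod.fst (fun _ p => g p) d1
    rw [this, hkitems]
    exact pv_update_of_subset _ _ (fun x hx => hx)
  have f5 : ∀ n ∈ d1.keys, d2.getD n []
      = PySem.List.sorted (d1.getD n []) (fun x => pvGet x "platform") false := by
    intro n hn
    obtain ⟨q, hq, hq1⟩ := List.mem_map.mp (hkitems ▸ hn)
    have hmem : (n, q.2) ∈ d1.items := by rwa [show (n, q.2) = q from Prod.ext hq1.symm rfl]
    rw [hd2, pv_getD_foldl_insert_mem g d1.items d1 n q.2 [] (hkitems.symm ▸ f2) hmem, hg,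
      PySem.Dict.getD_of_mem_items d1 hmem f2]
  calc d2.items = d2.keys.map (fun n => (n, d2.getD n [])) := pv_items_eq d2 [] (f4 ▸ f2)
    _ = d1.keys.map (fun n => (n, d2.getD n [])) := by rw [f4]
    _ = process_sample_data_alt xs := by
        unfold process_sample_data_alt
        rw [PySem.List.dedup_eq_ofList, ← f1]
        apply List.map_congr_left
        intro n hn
        rw [f5 n hn, f3 n]

-- ===== VERDICT (by name: the statement is the Claim_ definition above) =====
theorem process_sample_data_spec : Claim_equal_process_sample_data := by
  intro xs _ _
  unfold Spec_process_sample_data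
  exact pv_A_eq xs
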